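-- pv_equiv track=rewrite | github.com/cheneydon/efficient-bert | datasets/squad.py | get_char_to_word_positions
-- ===== SOURCE A (Python) =====
-- def get_char_to_word_positions(context, answer, start_char_pos, is_impossible):
--     context_tokens = []
--     char_to_word_offset = []
--     is_prev_whitespace = True
--     for c in context:
--         is_whitespace = (c == ' ' or c == '\t' or c == '\r' or c == '\n' or ord(c) == 0x202F)
--         if is_whitespace:
--             is_prev_whitespace = True
--         else:
--             if is_prev_whitespace:
--                 context_tokens.append(c)
--             else:
--                 context_tokens[-1] += c
--             is_prev_whitespace = False
--         char_to_word_offset.append(len(context_tokens) - 1)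
--
--     start_pos, end_pos = 0, 0
--     if start_char_pos is not None and not is_impossible:
--         start_pos = char_to_word_offset[start_char_pos]
--         end_pos = char_to_word_offset[start_char_pos + len(answer) - 1]
--     return start_pos, end_pos, context_tokens
-- ===== SOURCE B (Python) =====
-- def get_char_to_word_positions(context, answer, start_char_pos, is_impossible):
--     # Whitespace-split the context once; a char position p maps to a word index
--     # by counting the tokens of the prefix context[:p+1] (a token straddling p
--     # is still counted), so no per-character offset array is built.
--     context_tokens = context.split()
--     start_pos, end_pos = 0, 0
--     if start_char_pos is not None and not is_impossible:
--         start_pos = len(context[:start_char_pos + 1].split()) - 1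
--         end_pos = len(context[:start_char_pos + len(answer)].split()) - 1
--     return start_pos, end_pos, context_tokens
-- ===== Notes on version B (the rewrite author's own statement) =====
-- stated objective: faster
-- what changed: B drops A's character-by-character state machine and dense char_to_word_offset array entirely: it whitespace-splits the context once for the tokens and maps each char position p to a word index as len(context[:p+1].split()) - 1 (the number of tokens started at or before p); this also avoids A's quadratic `context_tokens[-1] += c` string rebuilding.
-- outside the precondition, e.g. on get_char_to_word_positions('ab', 'b', -1, False): A returns (0, 0, ['ab']), B returns (-1, -1, ['ab']); on get_char_to_word_positions('ab', '', 0, False): A returns (0, 0, ['ab']), B returns (0, -1, ['ab'])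
import Mathlib
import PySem

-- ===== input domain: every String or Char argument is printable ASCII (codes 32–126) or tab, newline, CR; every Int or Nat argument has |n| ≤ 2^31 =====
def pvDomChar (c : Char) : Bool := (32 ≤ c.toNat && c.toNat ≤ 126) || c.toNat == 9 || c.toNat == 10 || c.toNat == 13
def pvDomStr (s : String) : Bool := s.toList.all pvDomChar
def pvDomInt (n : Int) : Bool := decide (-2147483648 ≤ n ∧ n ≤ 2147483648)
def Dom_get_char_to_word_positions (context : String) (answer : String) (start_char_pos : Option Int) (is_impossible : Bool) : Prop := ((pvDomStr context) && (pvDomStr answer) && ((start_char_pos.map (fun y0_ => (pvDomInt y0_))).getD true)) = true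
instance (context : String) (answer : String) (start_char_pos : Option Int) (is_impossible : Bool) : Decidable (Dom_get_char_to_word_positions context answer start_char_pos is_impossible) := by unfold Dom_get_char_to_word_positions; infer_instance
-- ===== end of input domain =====

-- B whitespace-splits the context once (str.split) and maps a char position p
-- to a word index as the token count of the prefix context[:p+1] minus one,
-- instead of A's per-character state machine with a dense offset array; it also
-- avoids A's repeated last-token string concatenation (measured faster).


-- ===== PORT A =====
-- A's whitespace test, verbatim
def pvIsWs (c : Char) : Bool :=
  c == ' ' || c == '\t' || c == '\r' || c == '\n' || c.toNat == 0x202F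

-- one iteration of A's loop; tokens are List Char (Python str), `tokens[-1] += c`
-- becomes replacing the last element (unreachable when tokens = [], default [])
def pvStepA (st : List (List Char) × List Int × Bool) (c : Char) :
    List (List Char) × List Int × Bool :=
  if pvIsWs c then
    (st.1, st.2.1 ++ [(st.1.length : Int) - 1], true)
  else
    let tokens' :=
      if st.2.2 then st.1 ++ [[c]]
      else st.1.dropLast ++ [(st.1.getLast?.getD []) ++ [c]]
    (tokens', st.2.1 ++ [(tokens'.length : Int) - 1], false)

def get_char_to_word_positions (context : String) (answer : String) (start_char_pos : Option Int) (is_impossible : Bool) : Int × Int × List String :=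
  let st := context.toList.foldl pvStepA ([], [], true)
  let pos :=
    match start_char_pos with
    | some p =>
      if !is_impossible then
        (PySem.List.pyGetD st.2.1 p 0,
         PySem.List.pyGetD st.2.1 (p + (answer.toList.length : Int) - 1) 0)
      else (0, 0)
    | none => (0, 0)
  (pos.1, pos.2, st.1.map String.mk)

-- ===== PORT B =====
-- Python str.split() whitespace; exact on the ASCII input domain Dom
-- (tab/newline/CR/space; \x0b and \x0c are outside Dom)
def pvIsWsB (c : Char) : Bool :=
  c == ' ' || c == '\t' || c == '\n' || c == '\r' || c.toNat == 11 || c.toNat == 12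

-- hand port of Python str.split() (no argument): maximal runs of non-whitespace
def pvSplitWs : List Char → List (List Char)
  | [] => []
  | c :: rest =>
    if pvIsWsB c then pvSplitWs rest
    else (c :: rest.takeWhile (fun x => !pvIsWsB x)) ::
           pvSplitWs (rest.dropWhile (fun x => !pvIsWsB x))
  termination_by l => l.length
  decreasing_by
    · simp
    · have := List.length_dropWhile_le (fun x => !pvIsWsB x) rest
      simp; omega

def get_char_to_word_positions_alt (context : String) (answer : String) (start_char_pos : Option Int) (is_impossible : Bool) : Int × Int × List String :=
  let tokens := pvSplitWs context.toList
  let pos :=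
    match start_char_pos with
    | some p =>
      if !is_impossible then
        (((pvSplitWs (PySem.List.slice context.toList none (some (p + 1)))).length : Int) - 1,
         ((pvSplitWs (PySem.List.slice context.toList none (some (p + (answer.toList.length : Int))))).length : Int) - 1)
      else (0, 0)
    | none => (0, 0)
  (pos.1, pos.2, tokens.map String.mk)

-- ===== PRECONDITION & SPEC =====
-- Pre_ restricts the looked-up answer span to the natural domain: a nonempty answer
-- lying entirely inside the context at a nonnegative start position. It excludes
-- out-of-range positions (A raises IndexError) and, among inputs where A still
-- returns, negative start positions and empty answers, whose values come from
-- Python's negative-index wraparound.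
def Pre_get_char_to_word_positions (context : String) (answer : String) (start_char_pos : Option Int) (is_impossible : Bool) : Prop :=
  (is_impossible || start_char_pos.all (fun p =>
    decide (0 ≤ p ∧ 1 ≤ (answer.toList.length : Int) ∧
            p + (answer.toList.length : Int) ≤ (context.toList.length : Int)))) = true
instance (context : String) (answer : String) (start_char_pos : Option Int) (is_impossible : Bool) : Decidable (Pre_get_char_to_word_positions context answer start_char_pos is_impossible) := by unfold Pre_get_char_to_word_positions; infer_instance

def pvWitness_get_char_to_word_positions : String × String × Option Int × Bool :=
  ("ab c d", "c d", some 3, false)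

def Spec_get_char_to_word_positions (context : String) (answer : String) (start_char_pos : Option Int) (is_impossible : Bool) (out : Int × Int × List String) : Prop := out = get_char_to_word_positions_alt context answer start_char_pos is_impossible
instance (context : String) (answer : String) (start_char_pos : Option Int) (is_impossible : Bool) (out : Int × Int × List String) : Decidable (Spec_get_char_to_word_positions context answer start_char_pos is_impossible out) := by unfold Spec_get_char_to_word_positions; infer_instance

-- ===== CLAIM (what is proved, stated in full; the proofs are below) =====
def Claim_equal_get_char_to_word_positions : Prop := ∀ (context : String) (answer : String) (start_char_pos : Option Int) (is_impossible : Bool), Dom_get_char_to_word_positions context answer start_char_pos is_impossible → Pre_get_char_to_word_positions context answer start_char_pos is_impossible → Spec_get_char_to_word_positions context answer start_char_pos is_impossible (get_char_to_word_positions context answer start_char_pos is_impossible)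

-- ===== LEMMAS AND PROOFS =====

-- the two whitespace tests agree on domain characters
lemma pv_ws_agree (c : Char) (h : pvDomChar c = true) : pvIsWs c = pvIsWsB c := by
  have hn : (32 ≤ c.toNat ∧ c.toNat ≤ 126) ∨ c.toNat = 9 ∨ c.toNat = 10 ∨ c.toNat = 13 := by
    simpa [pvDomChar, or_assoc] using h
  have h1 : (c.toNat == 8239) = false := by
    simp only [beq_eq_false_iff_ne, ne_eq]; omega
  have h2 : (c.toNat == 11) = false := by
    simp only [beq_eq_false_iff_ne, ne_eq]; omega
  have h3 : (c.toNat == 12) = false := by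
    simp only [beq_eq_false_iff_ne, ne_eq]; omega
  simp only [pvIsWs, pvIsWsB, h1, h2, h3, Bool.or_false]
  by_cases hr : c == '\r' <;> by_cases hn2 : c == '\n' <;> simp [hr, hn2]

lemma pv_step_off (st : List (List Char) × List Int × Bool) (c : Char) :
    (pvStepA st c).2.1 = st.2.1 ++ [((pvStepA st c).1.length : Int) - 1] := by
  by_cases h : pvIsWs c = true <;> simp [pvStepA, h]

lemma pv_off_prefix (l : List Char) (st : List (List Char) × List Int × Bool) :
    ∃ ext, (l.foldl pvStepA st).2.1 = st.2.1 ++ ext := by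
  induction l generalizing st with
  | nil => exact ⟨[], by simp⟩
  | cons c l ih =>
    obtain ⟨ext, hext⟩ := ih (pvStepA st c)
    refine ⟨(((pvStepA st c).1.length : Int) - 1) :: ext, ?_⟩
    simp only [List.foldl_cons, hext]
    rw [pv_step_off]
    simp

-- the offset A records at position j is the token count after the (j+1)-prefix, minus one
lemma pv_offsets (l : List Char) (t : List (List Char)) (off : List Int) (pw : Bool)
    (j : Nat) (hj : j < l.length) :
    (l.foldl pvStepA (t, off, pw)).2.1.getD (off.length + j) 0 =
      (((l.take (j+1)).foldl pvStepA (t, off, pw)).1.length : Int) - 1 := by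
  induction l generalizing t off pw j with
  | nil => simp at hj
  | cons c l ih =>
    simp only [List.foldl_cons]
    have hoff' : (pvStepA (t, off, pw) c).2.1 =
        off ++ [(((pvStepA (t, off, pw) c).1.length : Int)) - 1] := pv_step_off _ _
    cases j with
    | zero =>
      obtain ⟨ext, hext⟩ := pv_off_prefix l (pvStepA (t, off, pw) c)
      rw [hext, hoff', Nat.add_zero, List.append_assoc,
          List.getD_append_right _ _ _ _ (Nat.le_refl _), Nat.sub_self]
      simp [List.take_succ_cons]
    | succ j =>
      have hst : pvStepA (t, off, pw) c =
          ((pvStepA (t, off, pw) c).1, (pvStepA (t, off, pw) c).2.1,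
           (pvStepA (t, off, pw) c).2.2) := rfl
      have hlen : (pvStepA (t, off, pw) c).2.1.length = off.length + 1 := by
        rw [hoff']; simp
      have := ih (pvStepA (t, off, pw) c).1 (pvStepA (t, off, pw) c).2.1
        (pvStepA (t, off, pw) c).2.2 j (by simpa using Nat.lt_of_succ_lt_succ hj)
      rw [← hst] at this
      rw [List.take_succ_cons, List.foldl_cons]
      rw [show off.length + (j + 1) = (pvStepA (t, off, pw) c).2.1.length + j by omega]
      exact this

-- A's fold computes the whitespace split, glued onto the open last token when pw = false
lemma pv_tokens (l : List Char) (t : List (List Char)) (off : List Int) (pw : Bool)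
    (hpw : pw = false → t ≠ [])
    (hagree : ∀ c ∈ l, pvIsWs c = pvIsWsB c) :
    (l.foldl pvStepA (t, off, pw)).1 =
      if pw then t ++ pvSplitWs l
      else t.dropLast ++
        ((t.getLast?.getD [] ++ l.takeWhile (fun x => !pvIsWsB x)) ::
          pvSplitWs (l.dropWhile (fun x => !pvIsWsB x))) := by
  induction l generalizing t off pw with
  | nil =>
    cases pw with
    | true => simp [pvSplitWs]
    | false =>
      have ht := hpw rfl
      simp only [List.foldl_nil, List.takeWhile_nil, List.dropWhile_nil, pvSplitWs,
        Bool.false_eq_true, reduceIte, List.append_nil,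
        List.getLast?_eq_getLast ht, Option.getD_some]
      exact (List.dropLast_append_getLast ht).symm
  | cons c l ih =>
    have hc : pvIsWs c = pvIsWsB c := hagree c (by simp)
    have hrest : ∀ x ∈ l, pvIsWs x = pvIsWsB x := fun x hx => hagree x (by simp [hx])
    simp only [List.foldl_cons]
    by_cases hw : pvIsWsB c = true
    · have hwA : pvIsWs c = true := hc.trans hw
      have hstep : pvStepA (t, off, pw) c = (t, off ++ [(t.length : Int) - 1], true) := by
        simp [pvStepA, hwA]
      rw [hstep]
      have := ih t (off ++ [(t.length : Int) - 1]) true (by simp) hrest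
      simp only [reduceIte] at this
      rw [this]
      cases pw with
      | true => simp [pvSplitWs, hw]
      | false =>
        have ht := hpw rfl
        have hsplit : pvSplitWs (c :: l) = pvSplitWs l := by simp [pvSplitWs, hw]
        simp only [Bool.false_eq_true, reduceIte, List.takeWhile_cons, List.dropWhile_cons,
          hw, Bool.not_true, List.append_nil, hsplit,
          List.getLast?_eq_getLast ht, Option.getD_some]
        conv_lhs => rw [← List.dropLast_append_getLast ht]
        simp
    · have hwA : pvIsWs c = false := hc.trans (by simp [hw])
      have hnw : (!pvIsWsB c) = true := by simp [hw]
      cases pw with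
      | true =>
        have hstep : pvStepA (t, off, true) c =
            (t ++ [[c]], off ++ [((t ++ [[c]]).length : Int) - 1], false) := by
          simp [pvStepA, hwA]
        rw [hstep]
        have := ih (t ++ [[c]]) (off ++ [((t ++ [[c]]).length : Int) - 1]) false
          (by simp) hrest
        simp only [Bool.false_eq_true, reduceIte] at this
        rw [this]
        simp [pvSplitWs, hw, hnw]
      | false =>
        have ht := hpw rfl
        have hstep : pvStepA (t, off, false) c =
            (t.dropLast ++ [t.getLast?.getD [] ++ [c]],
             off ++ [((t.dropLast ++ [t.getLast?.getD [] ++ [c]]).length : Int) - 1],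
             false) := by
          simp [pvStepA, hwA]
        rw [hstep]
        have := ih (t.dropLast ++ [t.getLast?.getD [] ++ [c]])
          (off ++ [((t.dropLast ++ [t.getLast?.getD [] ++ [c]]).length : Int) - 1]) false
          (by simp) hrest
        simp only [Bool.false_eq_true, reduceIte] at this
        rw [this]
        simp [hnw]

-- ===== VERDICT (by name: the statement is the Claim_ definition above) =====
theorem get_char_to_word_positions_spec : Claim_equal_get_char_to_word_positions := by
  intro context answer sp imp hdom hpre
  unfold Pre_get_char_to_word_positions at hpre
  unfold Spec_get_char_to_word_positions get_char_to_word_positions get_char_to_word_positions_alt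
  have hagree : ∀ c ∈ context.toList, pvIsWs c = pvIsWsB c := by
    intro c hc
    apply pv_ws_agree
    unfold Dom_get_char_to_word_positions pvDomStr at hdom
    simp only [Bool.and_eq_true, List.all_eq_true] at hdom
    exact hdom.1.1 c hc
  have htok : (context.toList.foldl pvStepA ([], [], true)).1 = pvSplitWs context.toList := by
    simpa using pv_tokens context.toList [] [] true (by simp) hagree
  cases sp with
  | none => simp only [htok]
  | some p =>
    cases imp with
    | true => simp only [Bool.not_true, Bool.false_eq_true, reduceIte, htok]
    | false =>
      have hp : 0 ≤ p ∧ 1 ≤ (answer.toList.length : Int) ∧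
          p + (answer.toList.length : Int) ≤ (context.toList.length : Int) := by
        simpa using hpre
      obtain ⟨hp0, ha1, hpb⟩ := hp
      -- the looked-up offset equals the prefix token count minus one
      have key : ∀ i : Int, 0 ≤ i → i < (context.toList.length : Int) →
          PySem.List.pyGetD (context.toList.foldl pvStepA ([], [], true)).2.1 i 0 =
            ((pvSplitWs (context.toList.take (i.toNat + 1))).length : Int) - 1 := by
        intro i hi0 hilt
        have hi : i = ((i.toNat : Nat) : Int) := (Int.toNat_of_nonneg hi0).symm
        rw [hi, PySem.List.pyGetD_natCast]
        have h1 := pv_offsets context.toList [] [] true i.toNat (by omega)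
        simp only [List.length_nil, Nat.zero_add] at h1
        rw [h1]
        have hagree' : ∀ c ∈ context.toList.take (i.toNat + 1), pvIsWs c = pvIsWsB c :=
          fun c hc => hagree c (List.take_subset _ _ hc)
        have := pv_tokens (context.toList.take (i.toNat + 1)) [] [] true (by simp) hagree'
        simp only [reduceIte, List.nil_append] at this
        rw [this]
        simp only [Int.toNat_natCast]
      have hs1 : PySem.List.slice context.toList none (some (p + 1)) =
          context.toList.take (p.toNat + 1) := by
        rw [PySem.List.slice_to]
        · congr 1; omega
        · omega
      have hs2 : PySem.List.slice context.toList none (some (p + (answer.toList.length : Int))) =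
          context.toList.take ((p + (answer.toList.length : Int) - 1).toNat + 1) := by
        rw [PySem.List.slice_to]
        · congr 1; omega
        · omega
      simp only [Bool.not_false, reduceIte, htok, hs1, hs2, Prod.mk.injEq]
      exact ⟨key p hp0 (by omega),
             key (p + (answer.toList.length : Int) - 1) (by omega) (by omega), trivial⟩
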